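-- pv_equiv track=rewrite | github.com/darkrenaissance/darkfi | script/research/zk/test.py | permute_indices
-- ===== SOURCE A (Python) =====
-- def permute_indices(wires):
--     size = len(wires)
--     permutation = [i + 1 for i in range(size)]
--     for i in range(size):
--         for j in range(i + 1, size):
--             if wires[i] == wires[j]:
--                 permutation[i], permutation[j] = permutation[j], permutation[i]
--                 break
--     return permutation
-- ===== SOURCE B (Python) =====
-- def permute_indices(wires):
--     # O(n): out[i] = index of next occurrence of wires[i] (or its first
--     # occurrence when i is the last one), plus 1 -- the cycle structure A builds.
--     first = {}
--     for i, w in enumerate(wires):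
--         if w not in first:
--             first[w] = i
--     out = [0] * len(wires)
--     seen = {}
--     for i in range(len(wires) - 1, -1, -1):
--         w = wires[i]
--         out[i] = seen.get(w, first[w]) + 1
--         seen[w] = i
--     return out
-- ===== Notes on version B (the rewrite author's own statement) =====
-- stated objective: faster
-- what changed: Replaces A's O(n^2) nested swap loops by an O(n) two-pass computation: a forward pass recording each value's first occurrence in a dict and a backward pass emitting next-occurrence-or-first (+1) per index.
import Mathlib
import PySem

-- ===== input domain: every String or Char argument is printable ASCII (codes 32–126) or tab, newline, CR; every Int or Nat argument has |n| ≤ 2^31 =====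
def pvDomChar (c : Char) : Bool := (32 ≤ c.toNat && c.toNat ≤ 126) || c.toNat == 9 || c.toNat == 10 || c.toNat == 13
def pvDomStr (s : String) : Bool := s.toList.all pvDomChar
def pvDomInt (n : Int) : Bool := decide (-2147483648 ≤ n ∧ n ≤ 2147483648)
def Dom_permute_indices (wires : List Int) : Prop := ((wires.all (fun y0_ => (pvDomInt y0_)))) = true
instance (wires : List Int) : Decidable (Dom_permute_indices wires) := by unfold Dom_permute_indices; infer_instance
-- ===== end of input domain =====

-- B replaces A's quadratic swap loop by a linear two-pass dict computation
-- (first occurrence forward, next occurrence backward); return values proved equal.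

-- ===== PORT A =====
-- inner loop: for j in range(i+1, size): if wires[i]==wires[j]: swap; break
def pvInnerA (wires : List Int) (i : Nat) (perm : List Int) (j : Nat) : List Int :=
  if _h : j < wires.length then
    if wires.getD i 0 = wires.getD j 0 then
      (perm.set i (perm.getD j 0)).set j (perm.getD i 0)
    else pvInnerA wires i perm (j + 1)
  else perm
termination_by wires.length - j

-- outer loop: for i in range(size)
def pvOuterA (wires : List Int) (perm : List Int) (i : Nat) : List Int :=
  if _h : i < wires.length then
    pvOuterA wires (pvInnerA wires i perm (i + 1)) (i + 1)
  else perm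
termination_by wires.length - i

def permute_indices (wires : List Int) : List Int :=
  pvOuterA wires ((List.range wires.length).map (fun (i : Nat) => (i : Int) + 1)) 0

-- ===== PORT B =====
-- first pass: for i, w in enumerate(wires): if w not in first: first[w] = i
def pvFirstB (l : List Int) (i : Nat) (d : PySem.Dict Int Int) : PySem.Dict Int Int :=
  match l with
  | [] => d
  | w :: rest =>
      pvFirstB rest (i + 1) (if (d.get? w).isSome then d else d.insert w (i : Int))

-- backward pass: for i reversed(range(n)): out[i] = seen.get(w, first[w]) + 1; seen[w] = i.
-- fuel = i + 1 processes index i; the assignments out[i] = … become prepends.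
def pvBackB (wires : List Int) (first : PySem.Dict Int Int)
    (seen : PySem.Dict Int Int) (fuel : Nat) (acc : List Int) : List Int :=
  match fuel with
  | 0 => acc
  | i + 1 =>
      let w := wires.getD i 0
      pvBackB wires first (seen.insert w (i : Int)) i
        ((seen.getD w (first.getD w 0) + 1) :: acc)

def permute_indices_alt (wires : List Int) : List Int :=
  pvBackB wires (pvFirstB wires 0 PySem.Dict.empty) PySem.Dict.empty wires.length []

-- ===== PRECONDITION & SPEC =====
def Spec_permute_indices (wires : List Int) (out : List Int) : Prop := out = permute_indices_alt wires
instance (wires : List Int) (out : List Int) : Decidable (Spec_permute_indices wires out) := by unfold Spec_permute_indices; infer_instance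

-- ===== CLAIM (what is proved, stated in full; the proofs are below) =====
def Claim_equal_permute_indices : Prop := ∀ (wires : List Int), Dom_permute_indices wires → Spec_permute_indices wires (permute_indices wires)

-- ===== LEMMAS AND PROOFS =====

-- index of the first occurrence of w in wires at position ≥ i (none if absent)
def nextFrom (wires : List Int) (i : Nat) (w : Int) : Option Nat :=
  if _h : i < wires.length then
    if wires.getD i 0 = w then some i else nextFrom wires (i + 1) w
  else none
termination_by wires.length - i

-- where A sends position i: the next equal position, else the first equal position
def succIdx (wires : List Int) (i : Nat) : Nat :=
  match nextFrom wires (i + 1) (wires.getD i 0) with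
  | some j => j
  | none => (nextFrom wires 0 (wires.getD i 0)).getD i

def specList (wires : List Int) : List Int :=
  (List.range wires.length).map (fun k => (succIdx wires k : Int) + 1)

theorem nextFrom_step (wires : List Int) (i : Nat) (w : Int) :
    nextFrom wires i w =
      if i < wires.length then
        (if wires.getD i 0 = w then some i else nextFrom wires (i + 1) w)
      else none := by
  rw [nextFrom]; split <;> simp_all

theorem nextFrom_none (wires : List Int) (i : Nat) (w : Int)
    (h : nextFrom wires i w = none) :
    ∀ j, i ≤ j → j < wires.length → wires.getD j 0 ≠ w := by
  intro j hij hj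
  induction hn : wires.length - i generalizing i with
  | zero => omega
  | succ m ih =>
    rw [nextFrom_step] at h
    by_cases hi : i < wires.length
    · simp only [hi, if_pos] at h
      split_ifs at h with he
      rcases Nat.eq_or_lt_of_le hij with rfl | hlt
      · exact he
      · exact ih (i+1) h hlt (by omega)
    · omega

theorem nextFrom_some (wires : List Int) (i j0 : Nat) (w : Int)
    (h : nextFrom wires i w = some j0) :
    i ≤ j0 ∧ j0 < wires.length ∧ wires.getD j0 0 = w ∧
      (∀ j, i ≤ j → j < j0 → wires.getD j 0 ≠ w) := by
  induction hn : wires.length - i generalizing i with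
  | zero =>
    rw [nextFrom_step] at h
    have : ¬ i < wires.length := by omega
    simp [this] at h
  | succ m ih =>
    rw [nextFrom_step] at h
    by_cases hi : i < wires.length
    · simp only [hi, if_pos] at h
      split_ifs at h with he
      · cases h
        exact ⟨le_refl _, hi, he, fun j h1 h2 => absurd (lt_of_le_of_lt h1 h2) (lt_irrefl _)⟩
      · obtain ⟨h1, h2, h3, h4⟩ := ih (i+1) h (by omega)
        refine ⟨by omega, h2, h3, fun j hij hj => ?_⟩
        rcases Nat.eq_or_lt_of_le hij with rfl | hlt
        · exact he
        · exact h4 j hlt hj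
    · simp [hi] at h

theorem nextFrom_isSome (wires : List Int) (i : Nat)
    (h : i < wires.length) : (nextFrom wires 0 (wires.getD i 0)).isSome := by
  cases hnf : nextFrom wires 0 (wires.getD i 0) with
  | some j => simp
  | none => exact absurd rfl (nextFrom_none wires 0 _ hnf i (Nat.zero_le _) h)

theorem firstB_get (wires : List Int) :
    ∀ i (d : PySem.Dict Int Int) w,
      (pvFirstB (wires.drop i) i d).get? w =
        ((d.get? w).orElse (fun _ => (nextFrom wires i w).map (fun n => (n : Int)))) := by
  intro i
  induction hn : wires.length - i generalizing i with
  | zero =>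
    intro d w
    have hi : ¬ i < wires.length := by omega
    rw [List.drop_eq_nil_of_le (by omega), nextFrom_step]
    simp [pvFirstB, hi, Option.orElse]
    cases d.get? w <;> rfl
  | succ m ih =>
    intro d w
    by_cases hi : i < wires.length
    · rw [List.drop_eq_getElem_cons hi]
      have hget : wires.getD i 0 = wires[i] := by
        simp [List.getD_eq_getElem?_getD, List.getElem?_eq_getElem hi]
      simp only [pvFirstB]
      rw [ih (i + 1) (by omega), nextFrom_step wires i w]
      rw [if_pos hi, hget]
      by_cases hw : wires[i] = w
      · subst hw
        cases hd : d.get? wires[i] with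
        | some v => simp [hd, Option.orElse]
        | none =>
          simp [PySem.Dict.get?_insert_self, Option.orElse]
      · have hw' : ¬ wires.getD i 0 = w := by rw [hget]; exact hw
        cases hd : d.get? wires[i] with
        | some v => simp [hw, Option.orElse]
        | none =>
          simp [PySem.Dict.get?_insert_of_ne _ _ (fun h => hw h.symm), hw, Option.orElse]
    · omega

theorem backB_spec (wires : List Int)
    (first : PySem.Dict Int Int)
    (hfirst : ∀ w, first.get? w = (nextFrom wires 0 w).map (fun n => (n : Int))) :
    ∀ i, i ≤ wires.length →
      ∀ (seen : PySem.Dict Int Int) acc,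
        (∀ w, seen.get? w = (nextFrom wires i w).map (fun n => (n : Int))) →
        pvBackB wires first seen i acc =
          ((List.range i).map (fun k => (succIdx wires k : Int) + 1)) ++ acc := by
  intro i
  induction i with
  | zero => intro _ seen acc _; simp [pvBackB]
  | succ i ih =>
    intro hle seen acc hseen
    have hi : i < wires.length := by omega
    simp only [pvBackB]
    have hstep : ∀ w', (seen.insert (wires.getD i 0) (i : Int)).get? w' =
        (nextFrom wires i w').map (fun n => (n : Int)) := by
      intro w'
      rw [PySem.Dict.get?_insert, nextFrom_step, if_pos hi]
      by_cases hw : w' = wires.getD i 0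
      · rw [if_pos hw, if_pos hw.symm]; rfl
      · rw [if_neg hw, if_neg (fun h => hw h.symm), hseen w']
    rw [ih (by omega) _ _ hstep, List.range_succ, List.map_append]
    have hv : seen.getD (wires.getD i 0) (first.getD (wires.getD i 0) 0)
        = (succIdx wires i : Int) := by
      rw [PySem.Dict.getD_eq_get?_getD, hseen]
      unfold succIdx
      cases hnf : nextFrom wires (i + 1) (wires.getD i 0) with
      | some j => simp
      | none =>
        show first.getD (wires.getD i 0) 0 = ((nextFrom wires 0 (wires.getD i 0)).getD i : Nat)
        rw [PySem.Dict.getD_eq_get?_getD, hfirst]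
        cases hn0 : nextFrom wires 0 (wires.getD i 0) with
        | some j0 => simp
        | none => exact absurd (nextFrom_isSome wires i hi) (by rw [hn0]; simp)
    rw [hv]
    simp

theorem alt_eq_spec (wires : List Int) : permute_indices_alt wires = specList wires := by
  have hf : ∀ w, (pvFirstB wires 0 PySem.Dict.empty).get? w
      = (nextFrom wires 0 w).map (fun n => (n : Int)) := by
    intro w
    have h := firstB_get wires 0 PySem.Dict.empty w
    rw [List.drop_zero] at h
    simpa [PySem.Dict.get?_empty, Option.orElse] using h
  have hs : ∀ w, (PySem.Dict.empty : PySem.Dict Int Int).get? w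
      = (nextFrom wires wires.length w).map (fun n => (n : Int)) := by
    intro w
    rw [nextFrom_step]
    simp [PySem.Dict.get?_empty]
  unfold permute_indices_alt specList
  rw [backB_spec wires _ hf wires.length le_rfl _ _ hs, List.append_nil]

-- the invariant A's outer loop maintains after processing i = 0 … t-1
def invA (wires perm : List Int) (t : Nat) : Prop :=
  perm.length = wires.length ∧
    ∀ k, k < wires.length →
      perm.getD k 0 =
        if k < t then (succIdx wires k : Int) + 1
        else if (∃ j, j < t ∧ wires.getD j 0 = wires.getD k 0) ∧
                (∀ j, t ≤ j → j < k → wires.getD j 0 ≠ wires.getD k 0) then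
          ((nextFrom wires 0 (wires.getD k 0)).getD k : Int) + 1
        else (k : Int) + 1

theorem getD_set_eq (l : List Int) (i k : Nat) (a : Int) :
    (l.set i a).getD k 0 = if i = k ∧ i < l.length then a else l.getD k 0 := by
  split_ifs with h
  · obtain ⟨rfl, hi⟩ := h
    rw [List.getD_eq_getElem _ _ (by simpa using hi), List.getElem_set_self]
  · by_cases hik : i = k
    · subst hik
      have hi : ¬ i < l.length := fun hi => h ⟨rfl, hi⟩
      rw [List.set_eq_of_length_le (by omega)]
    · simp [List.getD_eq_getElem?_getD, List.getElem?_set_ne hik]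

theorem innerA_eq (wires : List Int) (t : Nat) :
    ∀ j perm, pvInnerA wires t perm j =
      match nextFrom wires j (wires.getD t 0) with
      | some j0 => (perm.set t (perm.getD j0 0)).set j0 (perm.getD t 0)
      | none => perm := by
  intro j
  induction hn : wires.length - j generalizing j with
  | zero =>
    intro perm
    have hj : ¬ j < wires.length := by omega
    rw [pvInnerA, nextFrom_step]
    simp [hj]
  | succ m ih =>
    intro perm
    by_cases hj : j < wires.length
    · rw [pvInnerA, nextFrom_step, if_pos hj, dif_pos hj]
      by_cases he : wires.getD j 0 = wires.getD t 0
      · rw [if_pos he.symm, if_pos he]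
      · rw [if_neg (fun h => he h.symm), if_neg he, ih (j + 1) (by omega)]
    · have h' : ¬ j < wires.length := hj
      rw [pvInnerA, nextFrom_step]
      simp [h']

theorem first_eq_self (wires : List Int) (t : Nat) (ht : t < wires.length)
    (hno : ∀ j, j < t → wires.getD j 0 ≠ wires.getD t 0) :
    nextFrom wires 0 (wires.getD t 0) = some t := by
  cases h0 : nextFrom wires 0 (wires.getD t 0) with
  | none => exact absurd (nextFrom_isSome wires t ht) (by rw [h0]; simp)
  | some j0 =>
    obtain ⟨-, hj2, hj3, hj4⟩ := nextFrom_some wires 0 j0 _ h0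
    rcases lt_trichotomy j0 t with hlt | heq | hgt
    · exact absurd hj3 (hno j0 hlt)
    · rw [heq]
    · exact absurd rfl (hj4 t (Nat.zero_le _) hgt)

theorem cond_shift (wires : List Int) (t k : Nat) (hk : t < k)
    (hwk : wires.getD k 0 ≠ wires.getD t 0) :
    ((∃ j, j < t + 1 ∧ wires.getD j 0 = wires.getD k 0) ∧
      (∀ j, t + 1 ≤ j → j < k → wires.getD j 0 ≠ wires.getD k 0)) ↔
    ((∃ j, j < t ∧ wires.getD j 0 = wires.getD k 0) ∧
      (∀ j, t ≤ j → j < k → wires.getD j 0 ≠ wires.getD k 0)) := by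
  constructor
  · rintro ⟨⟨j, hj1, hj2⟩, hall⟩
    refine ⟨⟨j, ?_, hj2⟩, fun j' h1 h2 => ?_⟩
    · rcases Nat.lt_succ_iff_lt_or_eq.mp hj1 with h | h
      · exact h
      · subst h; exact absurd hj2.symm hwk
    · rcases Nat.eq_or_lt_of_le h1 with h | h
      · subst h; exact fun hc => hwk hc.symm
      · exact hall j' h h2
  · rintro ⟨⟨j, hj1, hj2⟩, hall⟩
    exact ⟨⟨j, by omega, hj2⟩, fun j' h1 h2 => hall j' (by omega) h2⟩

theorem invA_step (wires perm : List Int) (t : Nat) (ht : t < wires.length)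
    (h : invA wires perm t) : invA wires (pvInnerA wires t perm (t + 1)) (t + 1) := by
  obtain ⟨hlen, hk⟩ := h
  rw [innerA_eq]
  cases hnf : nextFrom wires (t + 1) (wires.getD t 0) with
  | none =>
    have hne := nextFrom_none wires (t + 1) _ hnf
    refine ⟨hlen, fun k hkn => ?_⟩
    have hold := hk k hkn
    by_cases h1 : k < t
    · rw [if_pos h1] at hold
      rw [if_pos (by omega : k < t + 1)]
      exact hold
    · by_cases h2 : k = t
      · subst h2
        rw [if_pos (by omega : k < k + 1)]
        have hsucc : succIdx wires k = (nextFrom wires 0 (wires.getD k 0)).getD k := by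
          unfold succIdx; rw [hnf]
        rw [hsucc]
        rw [if_neg h1] at hold
        by_cases hex : ∃ j, j < k ∧ wires.getD j 0 = wires.getD k 0
        · rw [if_pos ⟨hex, fun j a b => absurd (lt_of_le_of_lt a b) (lt_irrefl k)⟩] at hold
          exact hold
        · rw [if_neg (fun hc => hex hc.1)] at hold
          rw [first_eq_self wires k ht (fun j hj hc => hex ⟨j, hj, hc⟩)]
          simpa using hold
      · have hkt' : t < k := by omega
        have hwk : wires.getD k 0 ≠ wires.getD t 0 := hne k (by omega) hkn
        rw [if_neg h1] at hold
        rw [if_neg (by omega : ¬ k < t + 1), if_congr (cond_shift wires t k hkt' hwk) rfl rfl]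
        exact hold
  | some j0 =>
    obtain ⟨hj1, hj2, hj3, hj4⟩ := nextFrom_some wires (t + 1) j0 _ hnf
    have htj : t ≠ j0 := by omega
    refine ⟨by simpa using hlen, fun k hkn => ?_⟩
    rw [getD_set_eq, getD_set_eq]
    simp only [List.length_set]
    by_cases hkt : k = t
    · subst hkt
      rw [if_neg (fun hc => htj hc.1.symm), if_pos ⟨rfl, hlen ▸ ht⟩,
        if_pos (by omega : k < k + 1)]
      have hsucc : succIdx wires k = j0 := by unfold succIdx; rw [hnf]
      rw [hsucc]
      have hold := hk j0 hj2
      rw [if_neg (by omega : ¬ j0 < k),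
        if_neg (fun hc => hc.2 k (le_refl k) (by omega) hj3.symm)] at hold
      exact hold
    · by_cases hkj : k = j0
      · subst hkj
        rw [if_pos ⟨rfl, hlen ▸ hj2⟩, if_neg (by omega : ¬ k < t + 1)]
        have hcondT : (∃ j, j < t + 1 ∧ wires.getD j 0 = wires.getD k 0) ∧
            (∀ j, t + 1 ≤ j → j < k → wires.getD j 0 ≠ wires.getD k 0) :=
          ⟨⟨t, by omega, hj3.symm⟩, fun j hj hjj hc => hj4 j hj hjj (hc.trans hj3)⟩
        rw [if_pos hcondT]
        have hold := hk t ht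
        rw [if_neg (lt_irrefl t)] at hold
        by_cases hex : ∃ j, j < t ∧ wires.getD j 0 = wires.getD t 0
        · rw [if_pos ⟨hex, fun j a b => absurd (lt_of_le_of_lt a b) (lt_irrefl t)⟩] at hold
          obtain ⟨x, hx⟩ := Option.isSome_iff_exists.mp (nextFrom_isSome wires t ht)
          rw [hx] at hold
          rw [hj3, hx]
          simpa using hold
        · rw [if_neg (fun hc => hex hc.1)] at hold
          rw [hj3, first_eq_self wires t ht (fun j hj hc => hex ⟨j, hj, hc⟩)]
          simpa using hold
      · rw [if_neg (fun hc => hkj hc.1.symm), if_neg (fun hc => hkt hc.1.symm)]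
        have hold := hk k hkn
        by_cases h1 : k < t
        · rw [if_pos h1] at hold
          rw [if_pos (by omega : k < t + 1)]
          exact hold
        · have hkt' : t < k := by omega
          rw [if_neg h1] at hold
          rw [if_neg (by omega : ¬ k < t + 1)]
          by_cases hwk : wires.getD k 0 = wires.getD t 0
          · have hkj0 : j0 < k := by
              rcases lt_trichotomy k j0 with hlt' | he | hgt
              · exact absurd hwk (hj4 k (by omega) hlt')
              · exact absurd he hkj
              · exact hgt
            rw [if_neg (fun hc => hc.2 t (le_refl t) hkt' hwk.symm)] at hold
            rw [if_neg (fun hc => hc.2 j0 (by omega) hkj0 (hj3.trans hwk.symm))]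
            exact hold
          · rw [if_congr (cond_shift wires t k hkt' hwk) rfl rfl]
            exact hold

theorem outerA_spec (wires : List Int) :
    ∀ m t perm, wires.length - t = m → invA wires perm t →
      pvOuterA wires perm t = specList wires := by
  intro m
  induction m with
  | zero =>
    intro t perm hm hinv
    obtain ⟨hlen, hk⟩ := hinv
    have htn : wires.length ≤ t := by omega
    rw [pvOuterA, dif_neg (by omega : ¬ t < wires.length)]
    apply List.ext_getElem (by simp [hlen, specList])
    intro k h1 h2
    have hkn : k < wires.length := by rw [← hlen]; exact h1
    have hv := hk k hkn
    rw [if_pos (by omega : k < t)] at hv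
    rw [← List.getD_eq_getElem perm 0 h1, hv]
    simp [specList]
  | succ m ih =>
    intro t perm hm hinv
    have ht : t < wires.length := by omega
    rw [pvOuterA, dif_pos ht]
    exact ih (t + 1) _ (by omega) (invA_step wires perm t ht hinv)

theorem a_eq_spec (wires : List Int) : permute_indices wires = specList wires := by
  unfold permute_indices
  apply outerA_spec wires (wires.length - 0) 0 _ rfl
  refine ⟨by simp, fun k hkn => ?_⟩
  rw [if_neg (by omega : ¬ k < 0), if_neg (by rintro ⟨⟨j, hj, -⟩, -⟩; omega)]
  rw [List.getD_eq_getElem _ 0 (by simpa using hkn)]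
  rw [List.getElem_map, List.getElem_range]

-- ===== VERDICT (by name: the statement is the Claim_ definition above) =====
theorem permute_indices_spec : Claim_equal_permute_indices := by
  intro wires _
  unfold Spec_permute_indices
  rw [a_eq_spec, alt_eq_spec]
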